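-- pv_equiv track=rewrite | github.com/yangfan91/videogame | ui/device_panel.py | _move_device_id
-- ===== SOURCE A (Python) =====
-- def _move_device_id(device_ids: list[int], dragged_id: int, target_id: int | None) -> list[int]:
--     if dragged_id not in device_ids or dragged_id == target_id:
--         return list(device_ids)
--     ordered = [device_id for device_id in device_ids if device_id != dragged_id]
--     if target_id is None or target_id not in ordered:
--         ordered.append(dragged_id)
--         return ordered
--     target_index = ordered.index(target_id)
--     ordered.insert(target_index, dragged_id)
--     return ordered
-- ===== SOURCE B (Python) =====
-- def _move_device_id(device_ids: list[int], dragged_id: int, target_id: int | None) -> list[int]: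
--     if dragged_id not in device_ids or dragged_id == target_id:
--         return list(device_ids)
--     result = []
--     placed = False
--     for device_id in device_ids:
--         if device_id == dragged_id:
--             continue
--         if not placed and target_id is not None and device_id == target_id:
--             result.append(dragged_id)
--             placed = True
--         result.append(device_id)
--     if not placed:
--         result.append(dragged_id)
--     return result
-- ===== Notes on version B (the rewrite author's own statement) =====
-- stated objective: alternative
-- what changed: Replaces the three-pass filter + .index + .insert pipeline by one fused pass over device_ids with a 'placed' flag that skips dragged_id and splices it in front of the first target element inline.
import Mathlib
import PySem

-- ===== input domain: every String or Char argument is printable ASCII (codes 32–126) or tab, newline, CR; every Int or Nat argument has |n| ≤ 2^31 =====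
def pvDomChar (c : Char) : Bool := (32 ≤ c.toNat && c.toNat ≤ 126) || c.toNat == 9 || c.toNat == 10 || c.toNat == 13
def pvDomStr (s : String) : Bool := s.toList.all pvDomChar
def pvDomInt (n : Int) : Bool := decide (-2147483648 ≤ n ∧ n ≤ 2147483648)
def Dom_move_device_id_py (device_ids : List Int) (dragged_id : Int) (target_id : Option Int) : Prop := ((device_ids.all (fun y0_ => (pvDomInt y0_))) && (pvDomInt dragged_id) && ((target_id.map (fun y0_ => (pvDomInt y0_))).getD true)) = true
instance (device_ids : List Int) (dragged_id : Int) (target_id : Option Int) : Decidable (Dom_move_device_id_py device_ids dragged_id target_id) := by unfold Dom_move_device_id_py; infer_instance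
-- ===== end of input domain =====

-- B replaces A's filter + .index + .insert pipeline by one fused pass with a 'placed' flag (alternative decomposition, same cost).

-- ===== PORT A =====
def move_device_id_py (device_ids : List Int) (dragged_id : Int) (target_id : Option Int) : List Int :=
  if dragged_id ∉ device_ids ∨ target_id = some dragged_id then device_ids
  else
    let ordered := device_ids.filter (fun x => x ≠ dragged_id)
    match target_id with
    | none => ordered ++ [dragged_id]
    | some t =>
      if t ∉ ordered then ordered ++ [dragged_id]
      else
        match PySem.List.index? ordered t with
        | some k => PySem.List.insert ordered (k : Int) dragged_id
        | none => ordered ++ [dragged_id]   -- dead branch: .index is only reached after the membership test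

-- ===== PORT B =====
-- the loop body of Source B, folded over the list with state (result, placed)
def moveStep (dragged_id : Int) (target_id : Option Int) (st : List Int × Bool) (x : Int) : List Int × Bool :=
  if x = dragged_id then st
  else if st.2 = false ∧ target_id = some x then (st.1 ++ [dragged_id, x], true)
  else (st.1 ++ [x], st.2)

def move_device_id_py_alt (device_ids : List Int) (dragged_id : Int) (target_id : Option Int) : List Int :=
  if dragged_id ∉ device_ids ∨ target_id = some dragged_id then device_ids
  else
    let r := device_ids.foldl (moveStep dragged_id target_id) ([], false)
    if r.2 then r.1 else r.1 ++ [dragged_id]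

-- ===== PRECONDITION & SPEC =====
def Spec_move_device_id_py (device_ids : List Int) (dragged_id : Int) (target_id : Option Int) (out : List Int) : Prop := out = move_device_id_py_alt device_ids dragged_id target_id
instance (device_ids : List Int) (dragged_id : Int) (target_id : Option Int) (out : List Int) : Decidable (Spec_move_device_id_py device_ids dragged_id target_id out) := by unfold Spec_move_device_id_py; infer_instance

-- ===== CLAIM (what is proved, stated in full; the proofs are below) =====
def Claim_equal_move_device_id_py : Prop := ∀ (device_ids : List Int) (dragged_id : Int) (target_id : Option Int), Dom_move_device_id_py device_ids dragged_id target_id → Spec_move_device_id_py device_ids dragged_id target_id (move_device_id_py device_ids dragged_id target_id)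

-- ===== LEMMAS AND PROOFS =====

-- reference function: insert d before the first occurrence of v, append if absent
def insBefore (d v : Int) : List Int → List Int
  | [] => [d]
  | x :: xs => if x = v then d :: x :: xs else x :: insBefore d v xs

theorem insBefore_not_mem (d v : Int) (l : List Int) (h : v ∉ l) :
    insBefore d v l = l ++ [d] := by
  induction l with
  | nil => rfl
  | cons x xs ih =>
    simp only [List.mem_cons, not_or] at h
    simp [insBefore, Ne.symm h.1, ih h.2]

theorem insBefore_index (d v : Int) (l : List Int) :
    (match PySem.List.index? l v with
     | some k => PySem.List.insert l (k : Int) d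
     | none => l ++ [d]) = insBefore d v l := by
  induction l with
  | nil => rfl
  | cons x xs ih =>
    by_cases hx : x = v
    · subst hx
      rw [PySem.List.index?_cons_self]
      simp [insBefore, PySem.List.insert_zero]
    · rw [PySem.List.index?_cons_of_ne xs hx]
      cases hk : PySem.List.index? xs v with
      | none =>
        have ih' : xs ++ [d] = insBefore d v xs := by rw [hk] at ih; exact ih
        show x :: xs ++ [d] = insBefore d v (x :: xs)
        simp [insBefore, hx, ← ih']
      | some k =>
        have ih' : PySem.List.insert xs ((k : Nat) : Int) d = insBefore d v xs := by
          rw [hk] at ih; exact ih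
        have hkle : k ≤ xs.length := by
          obtain ⟨hlt, _, _⟩ := PySem.List.getElem_of_index?_eq_some hk
          omega
        show PySem.List.insert (x :: xs) (((k + 1 : Nat) : Int)) d = insBefore d v (x :: xs)
        rw [PySem.List.insert_natCast _ _ _ (by simpa using Nat.succ_le_succ hkle)]
        rw [PySem.List.insert_natCast _ _ _ hkle] at ih'
        simp [insBefore, hx, List.take_succ_cons, List.drop_succ_cons, ← ih']

theorem foldl_moveStep_true (d : Int) (t : Option Int) (xs : List Int) (acc : List Int) :
    xs.foldl (moveStep d t) (acc, true) = (acc ++ xs.filter (fun x => x ≠ d), true) := by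
  induction xs generalizing acc with
  | nil => simp
  | cons x xs ih =>
    by_cases hx : x = d
    · simp [moveStep, hx, ih]
    · simp [moveStep, hx, ih]

theorem foldl_moveStep_none (d : Int) (xs : List Int) (acc : List Int) :
    xs.foldl (moveStep d none) (acc, false) = (acc ++ xs.filter (fun x => x ≠ d), false) := by
  induction xs generalizing acc with
  | nil => simp
  | cons x xs ih =>
    by_cases hx : x = d
    · simp [moveStep, hx, ih]
    · simp [moveStep, hx, ih]

theorem foldl_moveStep_some (d v : Int) (xs : List Int) (acc : List Int) :
    (if (xs.foldl (moveStep d (some v)) (acc, false)).2 then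
       (xs.foldl (moveStep d (some v)) (acc, false)).1
     else (xs.foldl (moveStep d (some v)) (acc, false)).1 ++ [d]) =
    acc ++ insBefore d v (xs.filter (fun x => x ≠ d)) := by
  induction xs generalizing acc with
  | nil => simp [insBefore]
  | cons x xs ih =>
    by_cases hx : x = d
    · have h1 : moveStep d (some v) (acc, false) x = (acc, false) := by
        simp [moveStep, hx]
      rw [List.foldl_cons, h1, ih acc]
      simp [hx]
    · by_cases hv : v = x
      · have h1 : moveStep d (some v) (acc, false) x = (acc ++ [d, x], true) := by
          simp [moveStep, hx, hv]
        rw [List.foldl_cons, h1, foldl_moveStep_true]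
        simp [hx, insBefore, hv]
      · have h1 : moveStep d (some v) (acc, false) x = (acc ++ [x], false) := by
          simp [moveStep, hx, hv]
        rw [List.foldl_cons, h1, ih (acc ++ [x])]
        simp [hx, insBefore, Ne.symm hv]

-- ===== VERDICT (by name: the statement is the Claim_ definition above) =====
theorem move_device_id_py_spec : Claim_equal_move_device_id_py := by
  intro ids d t _
  unfold Spec_move_device_id_py move_device_id_py move_device_id_py_alt
  by_cases hg : d ∉ ids ∨ t = some d
  · simp only [if_pos hg]
  · simp only [if_neg hg]
    cases t with
    | none =>
      show (ids.filter (fun x => x ≠ d)) ++ [d] = _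
      rw [show (List.foldl (moveStep d none) ([], false) ids)
            = ([] ++ ids.filter (fun x => x ≠ d), false) from foldl_moveStep_none d ids []]
      simp
    | some v =>
      show (if v ∉ ids.filter (fun x => x ≠ d) then (ids.filter (fun x => x ≠ d)) ++ [d]
            else match PySem.List.index? (ids.filter (fun x => x ≠ d)) v with
                 | some k => PySem.List.insert (ids.filter (fun x => x ≠ d)) (k : Int) d
                 | none => (ids.filter (fun x => x ≠ d)) ++ [d]) = _
      rw [foldl_moveStep_some d v ids [], List.nil_append]
      by_cases hv : v ∈ ids.filter (fun x => x ≠ d)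
      · rw [if_neg (not_not_intro hv), insBefore_index d v (ids.filter (fun x => x ≠ d))]
      · rw [if_pos hv, insBefore_not_mem d v _ hv]
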